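-- pv_equiv track=rewrite | github.com/Argifari/Kerja | DASPRO KULIAH/mahasiswa.py | tidakMengerjakanKuisKelas
-- ===== SOURCE A (Python) =====
-- def Konso(e, L) :
--     return [e] + L
--
-- def FirstElmt(L) :
--     return L[0]
--
-- def Tail(L) :
--     return L[1:]
--
-- def getKelas(mhs) :
--     return mhs[2]
--
-- def getNilai(mhs):
--     return mhs[3]
--
-- def IsEmpty(L) :
--     return L == []
--
-- def tidakMengerjakanKuisKelas(kelas, setOfMhs) :
--     if IsEmpty(setOfMhs) :
--         return []
--     else:
--         if (getKelas(FirstElmt(setOfMhs)) == kelas) and IsEmpty(getNilai(FirstElmt(setOfMhs))) :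
--             return Konso(FirstElmt(setOfMhs), tidakMengerjakanKuisKelas(kelas, Tail(setOfMhs)))
--         else:
--             return tidakMengerjakanKuisKelas(kelas, Tail(setOfMhs))
-- ===== SOURCE B (Python) =====
-- def tidakMengerjakanKuisKelas(kelas, setOfMhs):
--     hasil = []
--     for mhs in setOfMhs:
--         if mhs[2] == kelas and mhs[3] == []:
--             hasil.append(mhs)
--     return hasil
-- ===== Notes on version B (the rewrite author's own statement) =====
-- stated objective: simpler
-- what changed: Replaced the helper-based head/tail recursion with a single iterative loop that appends matching students to an accumulator list.
import Mathlib
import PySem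

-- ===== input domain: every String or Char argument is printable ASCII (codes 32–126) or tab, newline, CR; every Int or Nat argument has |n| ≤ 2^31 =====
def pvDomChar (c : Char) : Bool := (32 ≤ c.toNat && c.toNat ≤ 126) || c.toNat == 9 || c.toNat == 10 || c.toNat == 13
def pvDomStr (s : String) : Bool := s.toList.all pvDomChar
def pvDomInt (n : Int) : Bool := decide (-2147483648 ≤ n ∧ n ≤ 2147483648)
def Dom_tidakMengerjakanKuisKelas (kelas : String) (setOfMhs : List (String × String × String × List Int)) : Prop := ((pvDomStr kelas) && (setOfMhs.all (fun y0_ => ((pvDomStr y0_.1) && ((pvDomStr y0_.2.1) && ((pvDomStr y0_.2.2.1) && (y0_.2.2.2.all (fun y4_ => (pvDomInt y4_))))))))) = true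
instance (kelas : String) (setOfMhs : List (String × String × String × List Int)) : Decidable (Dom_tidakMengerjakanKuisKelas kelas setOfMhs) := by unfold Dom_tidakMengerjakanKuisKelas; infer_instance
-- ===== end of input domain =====

-- B replaces the helper-based head/tail recursion with a single iterative accumulator loop; same results.

-- ===== PORT A =====
def pvKonso (e : String × String × String × List Int) (L : List (String × String × String × List Int)) : List (String × String × String × List Int) := [e] ++ L
def pvGetKelas (mhs : String × String × String × List Int) : String := mhs.2.2.1
def pvGetNilai (mhs : String × String × String × List Int) : List Int := mhs.2.2.2
def pvIsEmptyMhs (L : List (String × String × String × List Int)) : Bool := L == []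
def pvIsEmptyNilai (L : List Int) : Bool := L == []

def tidakMengerjakanKuisKelas (kelas : String) (setOfMhs : List (String × String × String × List Int)) : List (String × String × String × List Int) :=
  if pvIsEmptyMhs setOfMhs then []
  else
    match setOfMhs with
    | [] => []
    | first :: tail =>
      if pvGetKelas first == kelas && pvIsEmptyNilai (pvGetNilai first) then
        pvKonso first (tidakMengerjakanKuisKelas kelas tail)
      else
        tidakMengerjakanKuisKelas kelas tail

-- ===== PORT B =====
def tidakMengerjakanKuisKelas_alt (kelas : String) (setOfMhs : List (String × String × String × List Int)) : List (String × String × String × List Int) :=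
  setOfMhs.foldl (fun hasil mhs => if mhs.2.2.1 == kelas && mhs.2.2.2 == ([] : List Int) then hasil ++ [mhs] else hasil) []

-- ===== PRECONDITION & SPEC =====
def Spec_tidakMengerjakanKuisKelas (kelas : String) (setOfMhs : List (String × String × String × List Int)) (out : List (String × String × String × List Int)) : Prop := out = tidakMengerjakanKuisKelas_alt kelas setOfMhs
instance (kelas : String) (setOfMhs : List (String × String × String × List Int)) (out : List (String × String × String × List Int)) : Decidable (Spec_tidakMengerjakanKuisKelas kelas setOfMhs out) := by unfold Spec_tidakMengerjakanKuisKelas; infer_instance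

-- ===== CLAIM (what is proved, stated in full; the proofs are below) =====
def Claim_equal_tidakMengerjakanKuisKelas : Prop := ∀ (kelas : String) (setOfMhs : List (String × String × String × List Int)), Dom_tidakMengerjakanKuisKelas kelas setOfMhs → Spec_tidakMengerjakanKuisKelas kelas setOfMhs (tidakMengerjakanKuisKelas kelas setOfMhs)

-- ===== LEMMAS AND PROOFS =====
lemma alt_acc (kelas : String) (setOfMhs : List (String × String × String × List Int)) (acc : List (String × String × String × List Int)) :
    setOfMhs.foldl (fun hasil mhs => if mhs.2.2.1 == kelas && mhs.2.2.2 == ([] : List Int) then hasil ++ [mhs] else hasil) acc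
      = acc ++ tidakMengerjakanKuisKelas kelas setOfMhs := by
  induction setOfMhs generalizing acc with
  | nil => simp [tidakMengerjakanKuisKelas, pvIsEmptyMhs]
  | cons h t ih =>
    simp only [List.foldl_cons]
    by_cases hc : (h.2.2.1 == kelas && h.2.2.2 == ([] : List Int)) = true
    · rw [if_pos hc, ih]
      simp only [Bool.and_eq_true, beq_iff_eq] at hc
      simp [tidakMengerjakanKuisKelas, pvIsEmptyMhs, pvGetKelas, pvGetNilai, pvIsEmptyNilai, pvKonso, hc.1, hc.2]
    · rw [if_neg hc, ih]
      simp only [Bool.and_eq_true, beq_iff_eq, not_and] at hc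
      simp [tidakMengerjakanKuisKelas, pvIsEmptyMhs, pvGetKelas, pvGetNilai, pvIsEmptyNilai]
      intro h1 h2
      exact (hc h1 (by simpa using h2)).elim

-- ===== VERDICT (by name: the statement is the Claim_ definition above) =====
theorem tidakMengerjakanKuisKelas_spec : Claim_equal_tidakMengerjakanKuisKelas := by
  intro kelas setOfMhs _
  unfold Spec_tidakMengerjakanKuisKelas tidakMengerjakanKuisKelas_alt
  rw [alt_acc]
  simp
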